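-- pv_equiv track=rewrite | github.com/kanwarjotp/TheMusicDictionary | TMDEngine/recognize.py | find_final_song_id
-- ===== SOURCE A (Python) =====
-- def find_final_song_id(pairs):
--     counts_tds = dict()
--
--     for i in pairs:
--         tds = i[1]  # the time differences
--         counts_tds[tds] = counts_tds.get(tds, 0) + 1
--
--     max_tds_count = max(counts_tds, key=counts_tds.get)
--
--     songs_max_tds = {}
--     for i in pairs:
--         if i[1] == max_tds_count:
--             sid = i[0]
--             songs_max_tds[sid] = songs_max_tds.get(sid, 0) + 1
--
--     return max(songs_max_tds, key=songs_max_tds.get), songs_max_tds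
-- ===== SOURCE B (Python) =====
-- def find_final_song_id(pairs):
--     # one grouping pass: time-diff -> {song id -> count}
--     groups = {}
--     for sid, td in pairs:
--         inner = groups.setdefault(td, {})
--         inner[sid] = inner.get(sid, 0) + 1
--     winning_td = max(groups, key=lambda t: sum(groups[t].values()))
--     inner = groups[winning_td]
--     return max(inner, key=inner.get), inner
-- ===== Notes on version B (the rewrite author's own statement) =====
-- stated objective: alternative
-- what changed: Replaces A's two separate scans of pairs (count time-diffs, then re-scan filtering on the winner) by one grouping pass building a dict-of-dicts keyed by time-diff, followed by a selection phase over the groups.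
-- outside the precondition, e.g. on find_final_song_id([]): A raises ValueError, B raises ValueError
import Mathlib
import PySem

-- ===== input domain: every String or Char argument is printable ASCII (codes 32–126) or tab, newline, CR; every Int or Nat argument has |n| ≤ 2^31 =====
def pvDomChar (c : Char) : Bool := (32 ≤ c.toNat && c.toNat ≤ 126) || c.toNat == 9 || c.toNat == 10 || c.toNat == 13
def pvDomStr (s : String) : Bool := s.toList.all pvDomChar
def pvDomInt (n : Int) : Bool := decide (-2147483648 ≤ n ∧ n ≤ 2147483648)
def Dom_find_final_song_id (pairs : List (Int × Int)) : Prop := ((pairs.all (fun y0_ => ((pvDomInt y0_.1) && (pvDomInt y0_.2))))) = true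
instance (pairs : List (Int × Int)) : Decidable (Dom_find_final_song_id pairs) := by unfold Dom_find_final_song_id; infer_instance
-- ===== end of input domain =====

-- B replaces A's two separate scans of `pairs` by one grouping pass into a
-- dict-of-dicts keyed by time-diff plus a selection phase (alternative decomposition,
-- same asymptotic cost; return values proved equal on all nonempty inputs).

-- ===== PORT A =====
def find_final_song_id (pairs : List (Int × Int)) : Int × (List (Int × Int)) :=
  let counts_tds : PySem.Dict Int Int :=
    pairs.foldl (fun (d : PySem.Dict Int Int) i => d.insert i.2 (d.getD i.2 0 + 1)) PySem.Dict.empty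
  match PySem.List.max? counts_tds.keys (fun k => counts_tds.getD k 0) with
  | none => (0, [])  -- Python: max() on empty dict raises ValueError (excluded by Pre_)
  | some max_tds_count =>
    let songs_max_tds : PySem.Dict Int Int :=
      pairs.foldl (fun (d : PySem.Dict Int Int) i => if i.2 == max_tds_count then d.insert i.1 (d.getD i.1 0 + 1) else d)
        PySem.Dict.empty
    match PySem.List.max? songs_max_tds.keys (fun k => songs_max_tds.getD k 0) with
    | none => (0, [])  -- unreachable when pairs ≠ []
    | some sid => (sid, songs_max_tds.items)

-- ===== PORT B =====
def find_final_song_id_alt (pairs : List (Int × Int)) : Int × (List (Int × Int)) :=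
  let groups : PySem.Dict Int (PySem.Dict Int Int) :=
    pairs.foldl
      (fun (g : PySem.Dict Int (PySem.Dict Int Int)) p => g.modify p.2 PySem.Dict.empty (fun inner => inner.modify p.1 0 (· + 1)))
      PySem.Dict.empty
  match PySem.List.max? groups.keys (fun t => ((groups.getD t PySem.Dict.empty).values).sum) with
  | none => (0, [])  -- Python: max() on empty dict raises ValueError (excluded by Pre_)
  | some winning_td =>
    let inner := groups.getD winning_td PySem.Dict.empty
    match PySem.List.max? inner.keys (fun s => inner.getD s 0) with
    | none => (0, [])  -- unreachable when pairs ≠ []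
    | some sid => (sid, inner.items)

-- ===== PRECONDITION & SPEC =====
-- Pre_ excludes only the empty list, on which Python's max() raises ValueError in both A and B.
def Pre_find_final_song_id (pairs : List (Int × Int)) : Prop := pairs ≠ []
instance (pairs : List (Int × Int)) : Decidable (Pre_find_final_song_id pairs) := by
  unfold Pre_find_final_song_id; infer_instance

def pvWitness_find_final_song_id : (List (Int × Int)) := [(1, 2), (3, 2), (1, 5)]

def Spec_find_final_song_id (pairs : List (Int × Int)) (out : Int × (List (Int × Int))) : Prop :=
  out = find_final_song_id_alt pairs
instance (pairs : List (Int × Int)) (out : Int × (List (Int × Int))) :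
    Decidable (Spec_find_final_song_id pairs out) := by unfold Spec_find_final_song_id; infer_instance

-- ===== CLAIM (what is proved, stated in full; the proofs are below) =====
def Claim_equal_find_final_song_id : Prop :=
  ∀ (pairs : List (Int × Int)), Dom_find_final_song_id pairs → Pre_find_final_song_id pairs →
    Spec_find_final_song_id pairs (find_final_song_id pairs)

-- ===== LEMMAS AND PROOFS =====

/-- A guarded foldl is a foldl over the filtered list. -/
theorem pv_foldl_if_filter {α β : Type} (l : List α) (c : α → Bool) (f : β → α → β) (init : β) :
    l.foldl (fun acc x => if c x then f acc x else acc) init = (l.filter c).foldl f init := by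
  induction l generalizing init with
  | nil => rfl
  | cons a t ih =>
      by_cases h : c a = true <;> simp [List.foldl_cons, h, ih]

/-- Reading one group out of B's dict-of-dicts fold: it is the counting fold over
    exactly the pairs whose time-diff is `t`. -/
theorem pv_groups_getD (l : List (Int × Int)) (g : PySem.Dict Int (PySem.Dict Int Int)) (t : Int) :
    (l.foldl
        (fun (g : PySem.Dict Int (PySem.Dict Int Int)) p => g.modify p.2 PySem.Dict.empty (fun inner => inner.modify p.1 0 (· + 1)))
        g).getD t PySem.Dict.empty
      = (l.filter (fun i => i.2 == t)).foldl
          (fun inner p => inner.modify p.1 0 (· + 1)) (g.getD t PySem.Dict.empty) := by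
  induction l generalizing g with
  | nil => rfl
  | cons a rest ih =>
      simp only [List.foldl_cons, List.filter_cons]
      rw [ih]
      by_cases h : a.2 = t
      · simp [h]
      · have hb : (a.2 == t) = false := by simpa using h
        simp [hb, PySem.Dict.getD_modify, Ne.symm h]

/-- Each group of B is the counter of the song ids carrying that time-diff. -/
theorem pv_group_eq_counter (pairs : List (Int × Int)) (t : Int) :
    (pairs.foldl
        (fun (g : PySem.Dict Int (PySem.Dict Int Int)) p => g.modify p.2 PySem.Dict.empty (fun inner => inner.modify p.1 0 (· + 1)))
        PySem.Dict.empty).getD t PySem.Dict.empty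
      = PySem.Dict.counter ((pairs.filter (fun i => i.2 == t)).map (·.1)) := by
  rw [pv_groups_getD, PySem.Dict.counter_eq_foldl, List.foldl_map]
  rfl

/-- A's first dict is the counter of the time-diffs. -/
theorem pv_counts_eq_counter (pairs : List (Int × Int)) :
    pairs.foldl (fun (d : PySem.Dict Int Int) i => d.insert i.2 (d.getD i.2 0 + 1)) PySem.Dict.empty
      = PySem.Dict.counter (pairs.map (·.2)) := by
  rw [← PySem.Dict.foldl_insert_getD_add_one_eq_counter, List.foldl_map]

/-- Summing a counter's values gives the length of the counted list. -/
theorem pv_sum_counter_values (xs : List Int) :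
    (PySem.Dict.counter xs).values.sum = (xs.length : Int) := by
  have hv : (PySem.Dict.counter xs).values
      = (PySem.Set.ofList xs).map (fun k => ((xs.count k : Nat) : Int)) := by
    show (PySem.Dict.counter xs).items.map (·.2) = _
    rw [PySem.Dict.items_counter, List.map_map]
    rfl
  have hperm : (PySem.Set.ofList xs).Perm xs.dedup :=
    (List.perm_ext_iff_of_nodup (PySem.Set.nodup_ofList xs) xs.nodup_dedup).2
      (fun a => by simp [PySem.Set.mem_ofList, List.mem_dedup])
  rw [hv, (hperm.map _).sum_eq]
  have := List.sum_map_count_dedup_eq_length xs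
  have hcast : ((List.map (fun x => List.count x xs) xs.dedup).sum : Int)
      = ((xs.length : Nat) : Int) := by exact_mod_cast congrArg (Nat.cast : Nat → Int) this
  rw [← hcast]
  rw [Nat.cast_list_sum, List.map_map]
  rfl

/-- The two selection keys agree: A's count of a time-diff equals the size of B's group. -/
theorem pv_key_eq (pairs : List (Int × Int)) (t : Int) :
    (pairs.foldl (fun (d : PySem.Dict Int Int) i => d.insert i.2 (d.getD i.2 0 + 1)) PySem.Dict.empty).getD t 0
      = ((pairs.foldl
            (fun (g : PySem.Dict Int (PySem.Dict Int Int)) p => g.modify p.2 PySem.Dict.empty (fun inner => inner.modify p.1 0 (· + 1)))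
            PySem.Dict.empty).getD t PySem.Dict.empty).values.sum := by
  rw [pv_counts_eq_counter, PySem.Dict.getD_counter, pv_group_eq_counter, pv_sum_counter_values]
  simp only [List.length_map]
  rw [List.count_eq_countP, ← List.countP_eq_length_filter, List.countP_map]
  rfl

/-- A's second dict (given the winning time-diff) equals B's winning group. -/
theorem pv_songs_eq_group (pairs : List (Int × Int)) (m : Int) :
    pairs.foldl (fun (d : PySem.Dict Int Int) i => if i.2 == m then d.insert i.1 (d.getD i.1 0 + 1) else d)
        PySem.Dict.empty
      = (pairs.foldl
          (fun (g : PySem.Dict Int (PySem.Dict Int Int)) p => g.modify p.2 PySem.Dict.empty (fun inner => inner.modify p.1 0 (· + 1)))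
          PySem.Dict.empty).getD m PySem.Dict.empty := by
  rw [pv_group_eq_counter, pv_foldl_if_filter, ← PySem.Dict.foldl_insert_getD_add_one_eq_counter,
    List.foldl_map]

/-- The two dicts iterate their keys in the same order. -/
theorem pv_keys_eq (pairs : List (Int × Int)) :
    (pairs.foldl (fun (d : PySem.Dict Int Int) i => d.insert i.2 (d.getD i.2 0 + 1)) PySem.Dict.empty).keys
      = (pairs.foldl
          (fun (g : PySem.Dict Int (PySem.Dict Int Int)) p => g.modify p.2 PySem.Dict.empty (fun inner => inner.modify p.1 0 (· + 1)))
          PySem.Dict.empty).keys := by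
  rw [PySem.Dict.keys_foldl_insert_key pairs (fun i => i.2) (fun d i => d.getD i.2 0 + 1),
    PySem.Dict.keys_foldl_modify_key pairs (fun i => i.2) PySem.Dict.empty
      (fun _ p => fun inner => inner.modify p.1 0 (· + 1))]
  rfl

theorem pv_eq (pairs : List (Int × Int)) :
    find_final_song_id pairs = find_final_song_id_alt pairs := by
  unfold find_final_song_id find_final_song_id_alt
  have hk : (fun k => (pairs.foldl (fun (d : PySem.Dict Int Int) i => d.insert i.2 (d.getD i.2 0 + 1))
        PySem.Dict.empty).getD k 0)
      = (fun t => ((pairs.foldl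
            (fun (g : PySem.Dict Int (PySem.Dict Int Int)) p => g.modify p.2 PySem.Dict.empty (fun inner => inner.modify p.1 0 (· + 1)))
            PySem.Dict.empty).getD t PySem.Dict.empty).values.sum) :=
    funext (fun t => pv_key_eq pairs t)
  simp only [pv_keys_eq pairs, hk]
  cases h : PySem.List.max? (pairs.foldl
      (fun (g : PySem.Dict Int (PySem.Dict Int Int)) p => g.modify p.2 PySem.Dict.empty (fun inner => inner.modify p.1 0 (· + 1)))
      PySem.Dict.empty).keys
      (fun t => ((pairs.foldl
          (fun (g : PySem.Dict Int (PySem.Dict Int Int)) p => g.modify p.2 PySem.Dict.empty (fun inner => inner.modify p.1 0 (· + 1)))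
          PySem.Dict.empty).getD t PySem.Dict.empty).values.sum) with
  | none => rfl
  | some m => simp only [pv_songs_eq_group pairs m]

-- ===== VERDICT (by name: the statement is the Claim_ definition above) =====
theorem find_final_song_id_spec : Claim_equal_find_final_song_id := by
  intro pairs _ _
  unfold Spec_find_final_song_id
  exact pv_eq pairs
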